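-- pv_equiv track=rewrite | github.com/susanaf2000/python-lists-loops-programming-exercises | exercises/15.2-Parking_lot_check/app.py | get_parking_lot
-- ===== SOURCE A (Python) =====
-- def get_parking_lot(matrix):
--     state = {'total_slots': 0, 'available_slots': 0, 'occupied_slots': 0}
--
--     for i in range(len(matrix)):
--       for j in range(len(matrix[i])):
--         if matrix[i][j] == 1:
--           state['total_slots'] += 1
--           state['occupied_slots'] += 1
--         elif matrix[i][j] == 2:
--           state['total_slots'] += 1
--           state['available_slots'] += 1
--     return state
-- ===== SOURCE B (Python) =====
-- def get_parking_lot(matrix):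
--     flat = [cell for row in matrix for cell in row]
--     occupied = flat.count(1)
--     available = flat.count(2)
--     return {'total_slots': occupied + available,
--             'available_slots': available,
--             'occupied_slots': occupied}
-- ===== Notes on version B (the rewrite author's own statement) =====
-- stated objective: idiomatic
-- what changed: Replaces the index-based nested loops with per-cell branching and dict mutation by flattening the matrix once and taking two frequency counts (count of 1s and of 2s), from which the result dict is built directly.
import Mathlib
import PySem

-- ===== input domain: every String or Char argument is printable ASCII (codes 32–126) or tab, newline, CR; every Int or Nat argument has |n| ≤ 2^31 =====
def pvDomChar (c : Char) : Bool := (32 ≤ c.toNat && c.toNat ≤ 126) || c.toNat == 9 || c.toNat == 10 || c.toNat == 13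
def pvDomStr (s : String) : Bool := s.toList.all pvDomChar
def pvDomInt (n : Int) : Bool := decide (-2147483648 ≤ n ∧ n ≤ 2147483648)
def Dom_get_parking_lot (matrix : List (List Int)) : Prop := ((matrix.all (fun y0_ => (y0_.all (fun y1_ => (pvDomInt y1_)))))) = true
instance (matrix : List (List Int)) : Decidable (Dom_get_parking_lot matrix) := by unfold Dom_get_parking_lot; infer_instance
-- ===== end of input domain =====

-- B replaces A's index-based nested loops with per-cell dict mutation by a flatten
-- plus two frequency counts, from which the result dict is built directly (idiomatic).

-- ===== PORT A =====
-- `state['k'] += 1` is ported as Dict.modify with default 0; all three keys are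
-- always present, so the default is never read (exact on every reachable state).
def get_parking_lot (matrix : List (List Int)) : List (String × Int) :=
  let state0 : PySem.Dict String Int :=
    PySem.Dict.ofList [("total_slots", 0), ("available_slots", 0), ("occupied_slots", 0)]
  let final :=
    (PySem.List.pyRange 0 (PySem.List.len matrix)).foldl (fun state i =>
      let row := PySem.List.pyGetD matrix i []
      (PySem.List.pyRange 0 (PySem.List.len row)).foldl (fun state j =>
        let c := PySem.List.pyGetD row j 0
        if c = 1 then
          (state.modify "total_slots" 0 (· + 1)).modify "occupied_slots" 0 (· + 1)
        else if c = 2 then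
          (state.modify "total_slots" 0 (· + 1)).modify "available_slots" 0 (· + 1)
        else state) state) state0
  final.items

-- ===== PORT B =====
def get_parking_lot_alt (matrix : List (List Int)) : List (String × Int) :=
  let flat := matrix.flatMap (fun row => row)
  let occupied : Int := PySem.List.count flat 1
  let available : Int := PySem.List.count flat 2
  [("total_slots", occupied + available), ("available_slots", available),
   ("occupied_slots", occupied)]

-- ===== PRECONDITION & SPEC =====
def Spec_get_parking_lot (matrix : List (List Int)) (out : List (String × Int)) : Prop := out = get_parking_lot_alt matrix
instance (matrix : List (List Int)) (out : List (String × Int)) : Decidable (Spec_get_parking_lot matrix out) := by unfold Spec_get_parking_lot; infer_instance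

-- ===== CLAIM (what is proved, stated in full; the proofs are below) =====
def Claim_equal_get_parking_lot : Prop := ∀ (matrix : List (List Int)), Dom_get_parking_lot matrix → Spec_get_parking_lot matrix (get_parking_lot matrix)

-- ===== LEMMAS AND PROOFS =====

/-- The parking-lot state dict of A, with symbolic counter values. -/
def pvMkd (t a o : Int) : PySem.Dict String Int :=
  PySem.Dict.mk [("total_slots", t), ("available_slots", a), ("occupied_slots", o)]

lemma pvMkd_total (t a o : Int) :
    (pvMkd t a o).modify "total_slots" 0 (· + 1) = pvMkd (t + 1) a o := by
  simp [pvMkd, PySem.Dict.modify, PySem.Dict.insert, PySem.Dict.getD, PySem.Dict.get?,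
    PySem.Dict.contains]

lemma pvMkd_avail (t a o : Int) :
    (pvMkd t a o).modify "available_slots" 0 (· + 1) = pvMkd t (a + 1) o := by
  simp [pvMkd, PySem.Dict.modify, PySem.Dict.insert, PySem.Dict.getD, PySem.Dict.get?,
    PySem.Dict.contains]

lemma pvMkd_occ (t a o : Int) :
    (pvMkd t a o).modify "occupied_slots" 0 (· + 1) = pvMkd t a (o + 1) := by
  simp [pvMkd, PySem.Dict.modify, PySem.Dict.insert, PySem.Dict.getD, PySem.Dict.get?,
    PySem.Dict.contains]

/-- A's per-cell loop body preserves the three-key shape and adds the cell counts. -/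
lemma pv_foldl_cells (l : List Int) (t a o : Int) :
    l.foldl (fun state c =>
        if c = 1 then
          (state.modify "total_slots" 0 (· + 1)).modify "occupied_slots" 0 (· + 1)
        else if c = 2 then
          (state.modify "total_slots" 0 (· + 1)).modify "available_slots" 0 (· + 1)
        else state) (pvMkd t a o)
      = pvMkd (t + l.count 1 + l.count 2) (a + l.count 2) (o + l.count 1) := by
  induction l generalizing t a o with
  | nil => simp
  | cons x xs ih =>
    by_cases h1 : x = 1
    · simp [h1, List.foldl_cons, pvMkd_total, pvMkd_occ, ih]
      ring_nf
    · by_cases h2 : x = 2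
      · simp [h2, List.foldl_cons, pvMkd_total, pvMkd_avail, ih]
        ring_nf
      · simp [h1, h2, List.foldl_cons, ih]

-- ===== VERDICT (by name: the statement is the Claim_ definition above) =====
lemma pv_inner (row : List Int) (state : PySem.Dict String Int) :
    (PySem.List.pyRange 0 (PySem.List.len row)).foldl (fun state j =>
        if PySem.List.pyGetD row j 0 = 1 then
          (state.modify "total_slots" 0 (· + 1)).modify "occupied_slots" 0 (· + 1)
        else if PySem.List.pyGetD row j 0 = 2 then
          (state.modify "total_slots" 0 (· + 1)).modify "available_slots" 0 (· + 1)
        else state) state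
      = row.foldl (fun state c =>
        if c = 1 then
          (state.modify "total_slots" 0 (· + 1)).modify "occupied_slots" 0 (· + 1)
        else if c = 2 then
          (state.modify "total_slots" 0 (· + 1)).modify "available_slots" 0 (· + 1)
        else state) state :=
  PySem.List.foldl_pyRange_zero_pyGetD row 0 (fun state (c : Int) =>
        if c = 1 then
          (state.modify "total_slots" 0 (· + 1)).modify "occupied_slots" 0 (· + 1)
        else if c = 2 then
          (state.modify "total_slots" 0 (· + 1)).modify "available_slots" 0 (· + 1)
        else state) state

theorem get_parking_lot_spec : Claim_equal_get_parking_lot := by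
  intro matrix _
  unfold Spec_get_parking_lot get_parking_lot get_parking_lot_alt
  simp only [pv_inner]
  have h := PySem.List.foldl_pyRange_zero_pyGetD matrix ([] : List Int)
    (fun state (row : List Int) => row.foldl (fun state (c : Int) =>
        if c = 1 then
          (state.modify "total_slots" 0 (· + 1)).modify "occupied_slots" 0 (· + 1)
        else if c = 2 then
          (state.modify "total_slots" 0 (· + 1)).modify "available_slots" 0 (· + 1)
        else state) state)
    (PySem.Dict.ofList [("total_slots", (0:Int)), ("available_slots", 0), ("occupied_slots", 0)])
  refine Eq.trans (congrArg PySem.Dict.items h) ?_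
  rw [show (PySem.Dict.ofList
        [("total_slots", (0:Int)), ("available_slots", 0), ("occupied_slots", 0)])
      = pvMkd 0 0 0 from rfl]
  rw [← List.foldl_flatten, pv_foldl_cells]
  simp only [pvMkd, PySem.List.count, List.flatMap_id']
  simp [zero_add]
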